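-- pv_equiv track=rewrite | github.com/zhangzhiyong0410/k230_agent | test/chat.py | split_by_marks
-- ===== SOURCE A (Python) =====
-- def split_by_marks(buffer, marks):
--     """
--     从 buffer 中尽可能切出完整段落。
--     返回: (segments, remain)
--     """
--     segments = []
--     start = 0
--
--     for i, ch in enumerate(buffer):
--         if ch in marks:
--             seg = buffer[start:i + 1].strip()
--             if seg:
--                 segments.append(seg)
--             start = i + 1
--
--     remain = buffer[start:]
--     return segments, remain
-- ===== SOURCE B (Python) =====
-- def split_by_marks(buffer, marks):
--     """
--     从 buffer 中尽可能切出完整段落。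
--     返回: (segments, remain)
--     """
--     markset = set(marks)
--     pieces = []          # raw pieces, each ending with a mark
--     cur = []             # characters of the piece being built
--     for ch in buffer:
--         cur.append(ch)
--         if ch in markset:
--             pieces.append(''.join(cur))
--             cur = []
--     segments = [s for s in (p.strip() for p in pieces) if s]
--     return segments, ''.join(cur)
-- ===== Notes on version B (the rewrite author's own statement) =====
-- stated objective: alternative
-- what changed: B replaces A's index-keeping scan that cuts segments by slicing buffer[start:i+1] with a character-accumulator tokenizer that builds each raw piece char by char (no indices or slicing), followed by a separate strip-and-filter pass over the pieces.
import Mathlib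
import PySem

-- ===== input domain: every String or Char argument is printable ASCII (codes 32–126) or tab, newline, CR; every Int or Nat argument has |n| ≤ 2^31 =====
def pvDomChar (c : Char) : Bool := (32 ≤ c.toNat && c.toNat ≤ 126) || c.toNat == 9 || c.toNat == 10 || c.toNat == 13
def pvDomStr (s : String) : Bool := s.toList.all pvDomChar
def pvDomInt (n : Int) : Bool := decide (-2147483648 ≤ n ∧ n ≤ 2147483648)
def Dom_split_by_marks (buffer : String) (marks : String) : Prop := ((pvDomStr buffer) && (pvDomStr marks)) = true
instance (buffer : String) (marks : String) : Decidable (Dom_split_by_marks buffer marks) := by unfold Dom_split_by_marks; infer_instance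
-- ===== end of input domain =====

-- B replaces A's index-and-slice scan by a character-accumulator tokenizer (build each raw
-- piece char by char, no indices/slicing) followed by a separate strip-and-filter pass
-- (alternative decomposition, same cost); equivalence of the return values is proved below.

-- ===== PORT A =====
-- A: one loop over enumerate(buffer) keeping a start index; at each mark character cut
-- buffer[start:i+1].strip() out of the buffer by slicing.
def split_by_marks (buffer : String) (marks : String) : List String × String :=
  let bl := buffer.toList
  let st : List String × Int :=
    (PySem.List.enumerate bl 0).foldl
      (fun acc p =>
        if marks.toList.contains p.2 then
          let seg := PySem.Chars.strip (PySem.List.slice bl (some acc.2) (some (p.1 + 1)))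
          (if seg ≠ [] then acc.1 ++ [String.ofList seg] else acc.1, p.1 + 1)
        else acc)
      ([], 0)
  (st.1, String.ofList (PySem.List.slice bl (some st.2) none))

-- ===== PORT B =====
-- B: tokenize into raw pieces with a char accumulator (no indices, no slicing), then a
-- separate pass strips each piece and keeps the non-empty ones.
def split_by_marks_alt (buffer : String) (marks : String) : List String × String :=
  let markset : PySem.Set Char := PySem.Set.ofList marks.toList
  let st : List (List Char) × List Char :=
    buffer.toList.foldl
      (fun acc ch =>
        let cur := acc.2 ++ [ch]
        if PySem.Set.contains markset ch then (acc.1 ++ [cur], [])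
        else (acc.1, cur))
      ([], [])
  let segments :=
    ((st.1.map PySem.Chars.strip).filter (fun s => s ≠ [])).map String.ofList
  (segments, String.ofList st.2)

-- ===== PRECONDITION & SPEC =====
def Spec_split_by_marks (buffer : String) (marks : String) (out : List String × String) : Prop := out = split_by_marks_alt buffer marks
instance (buffer : String) (marks : String) (out : List String × String) : Decidable (Spec_split_by_marks buffer marks out) := by unfold Spec_split_by_marks; infer_instance

-- ===== CLAIM (what is proved, stated in full; the proofs are below) =====
def Claim_equal_split_by_marks : Prop := ∀ (buffer : String) (marks : String), Dom_split_by_marks buffer marks → Spec_split_by_marks buffer marks (split_by_marks buffer marks)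

-- ===== LEMMAS AND PROOFS =====

-- the strip-and-filter pass of B, as a function of the raw pieces
def pvClean (ps : List (List Char)) : List String :=
  ((ps.map PySem.Chars.strip).filter (fun s => s ≠ [])).map String.ofList

theorem pvClean_append_singleton (ps : List (List Char)) (c : List Char) :
    pvClean (ps ++ [c])
      = pvClean ps ++ (if PySem.Chars.strip c ≠ [] then [String.ofList (PySem.Chars.strip c)] else []) := by
  by_cases h : PySem.Chars.strip c = [] <;> simp [pvClean, h]

theorem contains_ofList_eq (l : List Char) (c : Char) :
    PySem.Set.contains (PySem.Set.ofList l) c = l.contains c := by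
  by_cases h : c ∈ l <;>
    simp [PySem.Set.mem_ofList, h]

-- loop invariant: A's (segments, start) state corresponds to B's (pieces, cur) state
theorem loop_inv (bl mk : List Char) :
    ∀ (t pre : List Char) (start : Nat) (segs : List String) (pieces : List (List Char)),
      bl = pre ++ t → start ≤ pre.length →
      segs = pvClean pieces →
      (let stA :=
        (PySem.List.enumerate t (pre.length : Int)).foldl
          (fun acc p =>
            if mk.contains p.2 then
              let seg := PySem.Chars.strip (PySem.List.slice bl (some acc.2) (some (p.1 + 1)))
              (if seg ≠ [] then acc.1 ++ [String.ofList seg] else acc.1, p.1 + 1)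
            else acc)
          (segs, (start : Int));
       let stB :=
        t.foldl
          (fun acc ch =>
            let cur := acc.2 ++ [ch]
            if mk.contains ch then (acc.1 ++ [cur], ([] : List Char)) else (acc.1, cur))
          (pieces, pre.drop start);
       stA.1 = pvClean stB.1 ∧ PySem.List.slice bl (some stA.2) none = stB.2) := by
  intro t
  induction t with
  | nil =>
    intro pre start segs pieces hbl hle hsegs
    simp only [PySem.List.enumerate_nil, List.foldl_nil]
    refine ⟨hsegs, ?_⟩
    rw [PySem.List.slice_from_natCast, hbl]
    simp
  | cons ch t ih =>
    intro pre start segs pieces hbl hle hsegs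
    simp only [PySem.List.enumerate_cons, List.foldl_cons]
    by_cases hm : mk.contains ch = true
    · simp only [hm, if_pos]
      have hslice : PySem.List.slice bl (some (start : Int)) (some ((pre.length : Int) + 1))
          = pre.drop start ++ [ch] := by
        have : ((pre.length : Int) + 1) = ((pre.length + 1 : Nat) : Int) := by push_cast; ring
        rw [this, PySem.List.slice_natCast, hbl]
        rw [List.drop_append_of_le_length hle]
        have hlen : pre.length + 1 - start = (pre.drop start).length + 1 := by
          simp [List.length_drop]; omega
        rw [hlen, List.take_append]
        simp
      have := ih (pre ++ [ch]) ((pre ++ [ch]).length)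
        (if PySem.Chars.strip (pre.drop start ++ [ch]) ≠ [] then
            segs ++ [String.ofList (PySem.Chars.strip (pre.drop start ++ [ch]))] else segs)
        (pieces ++ [pre.drop start ++ [ch]])
        (by simpa using hbl) (le_refl _)
        (by rw [pvClean_append_singleton, hsegs]
            by_cases h : PySem.Chars.strip (pre.drop start ++ [ch]) = [] <;> simp [h])
      simp only [List.drop_length, hslice] at this ⊢
      simp only [List.length_append, List.length_cons, List.length_nil] at this
      convert this using 3
    · simp only [hm, if_neg, Bool.false_eq_true, not_false_iff]
      have hdrop : (pre ++ [ch]).drop start = pre.drop start ++ [ch] :=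
        List.drop_append_of_le_length hle
      have := ih (pre ++ [ch]) start segs pieces (by simpa using hbl)
        (by simp; omega) hsegs
      rw [hdrop] at this
      simp only [List.length_append, List.length_cons, List.length_nil] at this
      convert this using 3

-- ===== VERDICT (by name: the statement is the Claim_ definition above) =====
theorem split_by_marks_spec : Claim_equal_split_by_marks := by
  intro buffer marks _
  unfold Spec_split_by_marks split_by_marks split_by_marks_alt
  simp only [contains_ofList_eq]
  have h := loop_inv buffer.toList marks.toList buffer.toList [] 0 [] []
    (by simp) (by simp) (by simp [pvClean])
  simp only [List.length_nil, Nat.cast_zero, List.drop_nil] at h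
  obtain ⟨h1, h2⟩ := h
  refine Prod.ext ?_ ?_
  · simpa [pvClean] using h1
  · simpa using congrArg String.ofList h2
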